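-- pv_equiv track=rewrite | github.com/olivier-noblanc/voxtral-pod | backend/core/merger.py | smooth_micro_turns
-- ===== SOURCE A (Python) =====
-- def smooth_micro_turns(words, max_run_length=1):
--     """
--     Relabel isolated micro-turns (single word flips) to surrounding speaker.
--     Code from TranscriptionSuite.
--     """
--     if len(words) < 3:
--         return words
--
--     # Build runs: [speaker, start_idx, length]
--     runs = []
--     i = 0
--     while i < len(words):
--         spk = words[i].get("speaker", "UNKNOWN")
--         j = i + 1
--         while j < len(words) and words[j].get("speaker", "UNKNOWN") == spk:
--             j += 1
--         runs.append([spk, i, j - i])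
--         i = j
--
--     # Identify runs to relabel
--     for r_idx in range(1, len(runs) - 1):
--         spk, start_idx, length = runs[r_idx]
--         if length > max_run_length:
--             continue
--         prev_spk = runs[r_idx - 1][0]
--         next_spk = runs[r_idx + 1][0]
--         if prev_spk == next_spk and prev_spk != spk:
--             for wi in range(start_idx, start_idx + length):
--                 words[wi]["speaker"] = prev_spk
--
--     return words
-- ===== SOURCE B (Python) =====
-- def smooth_micro_turns(words, max_run_length=1):
--     """Per-word formulation: precompute for every index the start and end of its
--     maximal same-speaker block with two sweeps (no run list), then relabel each
--     word whose block is short, interior and flanked by one identical speaker."""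
--     n = len(words)
--     if n < 3:
--         return words
--     spks = [w.get("speaker", "UNKNOWN") for w in words]
--     start = [0] * n
--     for i in range(1, n):
--         start[i] = start[i - 1] if spks[i] == spks[i - 1] else i
--     end = [0] * n
--     end[n - 1] = n
--     for i in range(n - 2, -1, -1):
--         end[i] = end[i + 1] if spks[i] == spks[i + 1] else i + 1
--     for i in range(n):
--         l, r = start[i], end[i]
--         if l > 0 and r < n and r - l <= max_run_length and spks[l - 1] == spks[r] and spks[l - 1] != spks[i]:
--             words[i]["speaker"] = spks[l - 1]
--     return words
-- ===== Notes on version B (the rewrite author's own statement) =====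
-- stated objective: alternative
-- what changed: B never builds a run list: two array sweeps compute, for every word index, the start and end of its maximal same-speaker block, and a final per-word pass relabels each index whose block is short, interior and flanked by one identical speaker.
import Mathlib
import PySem

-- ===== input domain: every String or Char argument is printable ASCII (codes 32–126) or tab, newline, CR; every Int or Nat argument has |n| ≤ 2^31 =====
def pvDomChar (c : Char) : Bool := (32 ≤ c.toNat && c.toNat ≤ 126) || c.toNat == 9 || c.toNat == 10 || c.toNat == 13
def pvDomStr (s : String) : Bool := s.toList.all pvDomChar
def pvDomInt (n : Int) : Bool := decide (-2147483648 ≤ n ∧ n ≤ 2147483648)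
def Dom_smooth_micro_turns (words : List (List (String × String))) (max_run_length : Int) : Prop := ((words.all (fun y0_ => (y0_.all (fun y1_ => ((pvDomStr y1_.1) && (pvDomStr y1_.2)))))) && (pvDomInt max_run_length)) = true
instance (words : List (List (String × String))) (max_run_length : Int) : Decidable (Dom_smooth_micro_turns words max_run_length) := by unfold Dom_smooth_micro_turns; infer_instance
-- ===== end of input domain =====

-- B drops A's run list entirely: two array sweeps give every word index the start and end of its
-- maximal same-speaker block and one per-word pass relabels short interior flanked blocks
-- (alternative per-index decomposition, same cost). Both Pythons mutate the shared word dicts in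
-- place identically; the equivalence proved here is about the returned list value.

-- words[i].get("speaker", "UNKNOWN")  (shared helper: both Pythons use this same expression)
def pvSpk (d : List (String × String)) : String :=
  (PySem.Dict.mk d).getD "speaker" "UNKNOWN"

-- d["speaker"] = s  (Python dict assignment; shared: both Pythons use this same statement)
def pvIns (d : List (String × String)) (s : String) : List (String × String) :=
  ((PySem.Dict.mk d).insert "speaker" s).items

-- ===== PORT A =====
def pvSpkAt (words : List (List (String × String))) (i : Nat) : String :=
  pvSpk (words.getD i [])

-- inner 'while j < len(words) and words[j].get(...) == spk: j += 1'
def pvScanJ (words : List (List (String × String))) (spk : String) (j : Nat) : Nat :=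
  if h : j < words.length ∧ pvSpkAt words j = spk then pvScanJ words spk (j + 1) else j
termination_by words.length - j
decreasing_by omega

-- needed for termination of pvBuildRuns (the outer while's index strictly advances)
theorem pvScanJ_ge (words : List (List (String × String))) (spk : String) (j : Nat) :
    j ≤ pvScanJ words spk j := by
  unfold pvScanJ
  split
  · have := pvScanJ_ge words spk (j + 1); omega
  · omega
termination_by words.length - j
decreasing_by rename_i h; omega

-- outer 'while i < len(words)' building the run records [spk, start_idx, length]
def pvBuildRuns (words : List (List (String × String))) (i : Nat) : List (String × Nat × Nat) :=
  if h : i < words.length then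
    (pvSpkAt words i, i, pvScanJ words (pvSpkAt words i) (i + 1) - i) ::
      pvBuildRuns words (pvScanJ words (pvSpkAt words i) (i + 1))
  else []
termination_by words.length - i
decreasing_by have := pvScanJ_ge words (pvSpkAt words i) (i + 1); omega

-- 'for wi in range(start_idx, start_idx + length): words[wi]["speaker"] = prev_spk'
def pvSetRange (ws : List (List (String × String))) (start len_ : Nat) (prev : String) :
    List (List (String × String)) :=
  (List.range' start len_).foldl
    (fun ws wi => ws.set wi (pvIns (ws.getD wi []) prev)) ws

def smooth_micro_turns (words : List (List (String × String))) (max_run_length : Int) :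
    List (List (String × String)) :=
  if (words.length : Int) < 3 then words
  else
    let runs := pvBuildRuns words 0
    (List.range' 1 (runs.length - 2)).foldl
      (fun ws r_idx =>
        let r := runs.getD r_idx ("", 0, 0)
        if (r.2.2 : Int) > max_run_length then ws
        else
          let prev_spk := (runs.getD (r_idx - 1) ("", 0, 0)).1
          let next_spk := (runs.getD (r_idx + 1) ("", 0, 0)).1
          if prev_spk = next_spk ∧ prev_spk ≠ r.1 then pvSetRange ws r.2.1 r.2.2 prev_spk
          else ws)
      words

-- ===== PORT B =====
-- 'spks = [w.get("speaker","UNKNOWN") for w in words]'; then the two boundary sweeps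
-- 'start[i] = start[i-1] if spks[i]==spks[i-1] else i' (i = 1..n-1) and
-- 'end[i] = end[i+1] if spks[i]==spks[i+1] else i+1' (i = n-2..0, end[n-1] = n, so
-- range(n-2,-1,-1) is (List.range (n-1)).reverse); then the per-word relabel pass.
def smooth_micro_turns_alt (words : List (List (String × String))) (max_run_length : Int) :
    List (List (String × String)) :=
  if ((words.length : Int) < 3) then words
  else
    let n := words.length
    let spks := words.map pvSpk
    let start := (List.range' 1 (n - 1)).foldl
      (fun st i => st.set i (if spks.getD i "" = spks.getD (i - 1) "" then st.getD (i - 1) 0 else i))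
      (List.replicate n 0)
    let end_ := ((List.range (n - 1)).reverse).foldl
      (fun st i => st.set i (if spks.getD i "" = spks.getD (i + 1) "" then st.getD (i + 1) 0 else i + 1))
      ((List.replicate n 0).set (n - 1) n)
    (List.range n).foldl
      (fun ws i =>
        if 0 < start.getD i 0 ∧ end_.getD i 0 < n ∧
            ((end_.getD i 0 : Int) - (start.getD i 0 : Int) ≤ max_run_length) ∧
            spks.getD (start.getD i 0 - 1) "" = spks.getD (end_.getD i 0) "" ∧
            spks.getD (start.getD i 0 - 1) "" ≠ spks.getD i "" then
          ws.set i (pvIns (ws.getD i []) (spks.getD (start.getD i 0 - 1) ""))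
        else ws)
      words

-- ===== PRECONDITION & SPEC =====
def Spec_smooth_micro_turns (words : List (List (String × String))) (max_run_length : Int) (out : List (List (String × String))) : Prop := out = smooth_micro_turns_alt words max_run_length
instance (words : List (List (String × String))) (max_run_length : Int) (out : List (List (String × String))) : Decidable (Spec_smooth_micro_turns words max_run_length out) := by unfold Spec_smooth_micro_turns; infer_instance

-- ===== CLAIM (what is proved, stated in full; the proofs are below) =====
def Claim_equal_smooth_micro_turns : Prop := ∀ (words : List (List (String × String))) (max_run_length : Int), Dom_smooth_micro_turns words max_run_length → Spec_smooth_micro_turns words max_run_length (smooth_micro_turns words max_run_length)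

-- ===== LEMMAS AND PROOFS =====

theorem drop_takeWhile_length {α : Type} (p : α → Bool) (l : List α) :
    l.drop (l.takeWhile p).length = l.dropWhile p := by
  calc l.drop (l.takeWhile p).length
      = (l.takeWhile p ++ l.dropWhile p).drop (l.takeWhile p).length := by
        rw [List.takeWhile_append_dropWhile]
    _ = l.dropWhile p := List.drop_left

-- A's inner while scan measured as a takeWhile of the remaining suffix
theorem scanJ_eq (words : List (List (String × String))) (spk : String) (j : Nat) :
    pvScanJ words spk j = j + ((words.drop j).takeWhile (fun x => pvSpk x == spk)).length := by
  unfold pvScanJ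
  split
  · rename_i h
    rw [scanJ_eq words spk (j + 1)]
    have hd : words.drop j = words[j] :: words.drop (j + 1) := List.drop_eq_getElem_cons h.1
    have hs : pvSpk words[j] = spk := by
      have : pvSpkAt words j = pvSpk words[j] := by
        simp [pvSpkAt, List.getD, List.getElem?_eq_getElem h.1]
      rw [← this]; exact h.2
    rw [hd, List.takeWhile_cons]
    have hb : (pvSpk words[j] == spk) = true := by simp [hs]
    rw [hb]
    simp only [List.length_cons, if_true]
    omega
  · rename_i h
    by_cases hj : j < words.length
    · have hd : words.drop j = words[j] :: words.drop (j + 1) := List.drop_eq_getElem_cons hj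
      have hs : ¬ (pvSpk words[j] = spk) := by
        intro hc
        apply h
        refine ⟨hj, ?_⟩
        simpa [pvSpkAt, List.getD, List.getElem?_eq_getElem hj] using hc
      rw [hd, List.takeWhile_cons]
      have hb : (pvSpk words[j] == spk) = false := by simp [hs]
      rw [hb]
      simp
    · rw [List.drop_eq_nil_of_le (by omega)]
      simp
termination_by words.length - j
decreasing_by rename_i h; omega

-- canonical grouping of words into speaker runs (proof-side characterization)
def cgroups : List (List (String × String)) → List (String × List (List (String × String)))
  | [] => []
  | w :: ws =>
    (pvSpk w, w :: ws.takeWhile (fun x => pvSpk x == pvSpk w)) ::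
      cgroups (ws.dropWhile (fun x => pvSpk x == pvSpk w))
termination_by l => l.length
decreasing_by simp [List.length_dropWhile_le]

-- A's run records for a group list starting at a given offset
def runsFrom (i : Nat) : List (String × List (List (String × String))) → List (String × Nat × Nat)
  | [] => []
  | (s, g) :: rest => (s, i, g.length) :: runsFrom (i + g.length) rest

theorem buildRuns_eq (words : List (List (String × String))) (i : Nat) :
    pvBuildRuns words i = runsFrom i (cgroups (words.drop i)) := by
  unfold pvBuildRuns
  split
  · rename_i h
    have hd : words.drop i = words[i] :: words.drop (i + 1) := List.drop_eq_getElem_cons h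
    have hspk : pvSpkAt words i = pvSpk words[i] := by
      simp [pvSpkAt, List.getD, List.getElem?_eq_getElem h]
    have hj := scanJ_eq words (pvSpkAt words i) (i + 1)
    have hge := pvScanJ_ge words (pvSpkAt words i) (i + 1)
    set j := pvScanJ words (pvSpkAt words i) (i + 1) with hjdef
    have hdropj : words.drop j = (words.drop (i + 1)).dropWhile
        (fun x => pvSpk x == pvSpkAt words i) := by
      rw [hj, ← List.drop_drop, drop_takeWhile_length]
    rw [buildRuns_eq words j, hd]
    rw [cgroups]
    simp only [runsFrom, ← hspk, List.cons_eq_cons, Prod.mk.injEq, List.length_cons]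
    refine ⟨⟨trivial, trivial, by omega⟩, ?_⟩
    rw [hdropj]
    congr 1
    omega
  · rename_i h
    rw [List.drop_eq_nil_of_le (by omega)]
    simp [cgroups, runsFrom]
termination_by words.length - i
decreasing_by have := pvScanJ_ge words (pvSpkAt words i) (i + 1); omega

theorem setRange_eq (chunk : List (List (String × String))) (pre suf : List (List (String × String))) (s : String) :
    pvSetRange (pre ++ (chunk ++ suf)) pre.length chunk.length s =
      pre ++ (chunk.map (fun d => pvIns d s) ++ suf) := by
  induction chunk generalizing pre with
  | nil => simp [pvSetRange]
  | cons d ch ih =>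
    simp only [List.length_cons, pvSetRange, List.range'_succ, List.foldl_cons]
    rw [List.getD_append_right _ _ _ _ (le_refl _), Nat.sub_self]
    simp only [List.cons_append, List.getD_cons_zero]
    rw [List.set_append_right _ _ (le_refl _), Nat.sub_self]
    simp only [List.set_cons_zero]
    have h1 : pre ++ pvIns d s :: (ch ++ suf) = (pre ++ [pvIns d s]) ++ (ch ++ suf) := by simp
    rw [h1]
    have h2 : pre.length + 1 = (pre ++ [pvIns d s]).length := by simp
    rw [h2]
    have := ih (pre ++ [pvIns d s])
    simp only [pvSetRange] at this
    rw [this]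
    simp

theorem flatten_cgroups (l : List (List (String × String))) :
    ((cgroups l).map (·.2)).flatten = l := by
  induction l using cgroups.induct with
  | case1 => simp [cgroups]
  | case2 w ws ih =>
    rw [cgroups]
    simp only [List.map_cons, List.flatten_cons, ih]
    simp [List.takeWhile_append_dropWhile]

def triples {α : Type} : List α → List (α × α × α)
  | a :: b :: c :: rest => (a, b, c) :: triples (b :: c :: rest)
  | _ => []

theorem triples_map_range (L : List (String × Nat × Nat)) (xs : List (String × Nat × Nat))
    (o : Nat) (h : L.drop o = xs) :
    (List.range' (o + 1) (xs.length - 2)).map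
        (fun r => (L.getD (r - 1) ("", 0, 0), L.getD r ("", 0, 0), L.getD (r + 1) ("", 0, 0))) =
      triples xs := by
  match xs with
  | [] => simp [triples]
  | [a] => simp [triples]
  | [a, b] => simp [triples]
  | a :: b :: c :: rest =>
    have hget : ∀ k x, (L.drop o)[k]? = some x → L.getD (o + k) ("", 0, 0) = x := by
      intro k x hk
      rw [List.getElem?_drop] at hk
      simp [List.getD, hk]
    have ha : L.getD o ("", 0, 0) = a := by
      have := hget 0 a (by rw [h]; rfl)
      simpa using this
    have hb : L.getD (o + 1) ("", 0, 0) = b := hget 1 b (by rw [h]; rfl)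
    have hc : L.getD (o + 2) ("", 0, 0) = c := hget 2 c (by rw [h]; rfl)
    have hlen : (a :: b :: c :: rest).length - 2 = rest.length + 1 := by simp
    rw [hlen, List.range'_succ, List.map_cons]
    have hdrop1 : L.drop (o + 1) = b :: c :: rest := by
      have : L.drop (o + 1) = (L.drop o).drop 1 := by rw [List.drop_drop]
      rw [this, h]; rfl
    have ih := triples_map_range L (b :: c :: rest) (o + 1) hdrop1
    simp only [List.length_cons] at ih
    have hlen2 : rest.length + 1 + 1 - 2 = rest.length := by omega
    rw [hlen2] at ih
    rw [triples]
    refine List.cons_eq_cons.mpr ⟨?_, ih⟩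
    have e : o + 1 + 1 = o + 2 := by omega
    simp only [Nat.add_sub_cancel, e]
    rw [ha, hb, hc]

-- the body of A's relabel fold as a function of the run triple it reads
def pvStepA (max_run_length : Int) (ws : List (List (String × String)))
    (t : (String × Nat × Nat) × (String × Nat × Nat) × (String × Nat × Nat)) :
    List (List (String × String)) :=
  if (t.2.1.2.2 : Int) > max_run_length then ws
  else if t.1.1 = t.2.2.1 ∧ t.1.1 ≠ t.2.1.1 then pvSetRange ws t.2.1.2.1 t.2.1.2.2 t.1.1
  else ws

-- A's result over a group decomposition: the middle groups relabeled by the triple rule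
def pvFixB (max_run_length : Int) (prevSpk : String) :
    List (String × List (List (String × String))) → List (List (String × String))
  | b :: c :: rest =>
      (if (b.2.length : Int) ≤ max_run_length ∧ prevSpk = c.1 ∧ prevSpk ≠ b.1 then
        b.2.map (fun d => pvIns d prevSpk)
      else b.2) ++ pvFixB max_run_length b.1 (c :: rest)
  | [b] => b.2
  | [] => []

theorem fold_triples (max_run_length : Int)
    (gs : List (String × List (List (String × String)))) (ps : String) (pi_ pl : Nat)
    (pre : List (List (String × String))) :
    (triples ((ps, pi_, pl) :: runsFrom pre.length gs)).foldl (pvStepA max_run_length)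
        (pre ++ (gs.map (·.2)).flatten) =
      pre ++ pvFixB max_run_length ps gs := by
  induction gs generalizing ps pi_ pl pre with
  | nil => simp [runsFrom, triples, pvFixB]
  | cons b tail ih =>
    match tail with
    | [] =>
      obtain ⟨bs, bg⟩ := b
      simp [runsFrom, triples, pvFixB]
    | c :: rest =>
      obtain ⟨bs, bg⟩ := b
      simp only [runsFrom, triples, List.foldl_cons, List.map_cons, List.flatten_cons]
      rw [pvFixB]
      have key : ∀ (newb : List (List (String × String))), newb.length = bg.length →
          List.foldl (pvStepA max_run_length)
            ((pre ++ newb) ++ (c.2 ++ (List.map (fun x => x.2) rest).flatten))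
            (triples ((bs, pre.length, bg.length) ::
              (c.1, pre.length + bg.length, c.2.length) ::
                runsFrom (pre.length + bg.length + c.2.length) rest)) =
          (pre ++ newb) ++ pvFixB max_run_length bs (c :: rest) := by
        intro newb hlen
        have h1 := ih bs pre.length bg.length (pre ++ newb)
        simp only [runsFrom, List.map_cons, List.flatten_cons, List.length_append, hlen,
          List.append_assoc] at h1 ⊢
        exact h1
      by_cases hgt : (bg.length : Int) > max_run_length
      · have hcB : ¬ ((bg.length : Int) ≤ max_run_length ∧ ps = c.1 ∧ ps ≠ bs) := by
          intro hc; omega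
        rw [if_neg hcB]
        have hstep : pvStepA max_run_length
            (pre ++ (bg ++ (c.2 ++ (List.map (fun x => x.2) rest).flatten)))
            ((ps, pi_, pl), (bs, pre.length, bg.length), (c.1, pre.length + bg.length, c.2.length))
            = (pre ++ bg) ++ (c.2 ++ (List.map (fun x => x.2) rest).flatten) := by
          simp only [pvStepA]
          rw [if_pos hgt]
          simp
        rw [hstep, key bg rfl]
        simp
      · by_cases hpn : ps = c.1 ∧ ps ≠ bs
        · have hcB : ((bg.length : Int) ≤ max_run_length ∧ ps = c.1 ∧ ps ≠ bs) :=
            ⟨by omega, hpn⟩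
          rw [if_pos hcB]
          have hstep : pvStepA max_run_length
              (pre ++ (bg ++ (c.2 ++ (List.map (fun x => x.2) rest).flatten)))
              ((ps, pi_, pl), (bs, pre.length, bg.length), (c.1, pre.length + bg.length, c.2.length))
              = (pre ++ bg.map (fun d => pvIns d ps)) ++ (c.2 ++ (List.map (fun x => x.2) rest).flatten) := by
            simp only [pvStepA]
            rw [if_neg hgt, if_pos hpn]
            have := setRange_eq bg pre (c.2 ++ (List.map (fun x => x.2) rest).flatten) ps
            simp only [List.append_assoc] at this ⊢
            exact this
          rw [hstep, key (bg.map (fun d => pvIns d ps)) (by simp)]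
          simp
        · have hcB : ¬ ((bg.length : Int) ≤ max_run_length ∧ ps = c.1 ∧ ps ≠ bs) := by
            intro hc; exact hpn hc.2
          rw [if_neg hcB]
          have hstep : pvStepA max_run_length
              (pre ++ (bg ++ (c.2 ++ (List.map (fun x => x.2) rest).flatten)))
              ((ps, pi_, pl), (bs, pre.length, bg.length), (c.1, pre.length + bg.length, c.2.length))
              = (pre ++ bg) ++ (c.2 ++ (List.map (fun x => x.2) rest).flatten) := by
            simp only [pvStepA]
            rw [if_neg hgt, if_neg hpn]
            simp
          rw [hstep, key bg rfl]
          simp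

-- A as "first group unchanged ++ triple-rule fix of the remaining groups"
theorem A_eq_fix (w0 : List (String × String)) (rest : List (List (String × String)))
    (max_run_length : Int) (h3 : ¬ (((w0 :: rest).length : Int) < 3)) :
    smooth_micro_turns (w0 :: rest) max_run_length =
      (w0 :: rest.takeWhile (fun x => pvSpk x == pvSpk w0)) ++
        pvFixB max_run_length (pvSpk w0)
          (cgroups (rest.dropWhile (fun x => pvSpk x == pvSpk w0))) := by
  unfold smooth_micro_turns
  rw [if_neg h3]
  show (List.foldl (fun ws r_idx => pvStepA max_run_length ws
        ((pvBuildRuns (w0 :: rest) 0).getD (r_idx - 1) ("", 0, 0),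
         (pvBuildRuns (w0 :: rest) 0).getD r_idx ("", 0, 0),
         (pvBuildRuns (w0 :: rest) 0).getD (r_idx + 1) ("", 0, 0)))
      (w0 :: rest) (List.range' 1 ((pvBuildRuns (w0 :: rest) 0).length - 2))) = _
  have hruns : pvBuildRuns (w0 :: rest) 0 = runsFrom 0 (cgroups (w0 :: rest)) := by
    simpa using buildRuns_eq (w0 :: rest) 0
  have hcg : cgroups (w0 :: rest) =
      (pvSpk w0, w0 :: rest.takeWhile (fun x => pvSpk x == pvSpk w0)) ::
        cgroups (rest.dropWhile (fun x => pvSpk x == pvSpk w0)) := by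
    rw [cgroups]
  set g0 := w0 :: rest.takeWhile (fun x => pvSpk x == pvSpk w0) with hg0
  set gs := cgroups (rest.dropWhile (fun x => pvSpk x == pvSpk w0)) with hgs
  have hwords : w0 :: rest = g0 ++ (gs.map (·.2)).flatten := by
    conv_lhs => rw [← flatten_cgroups (w0 :: rest), hcg]
    simp
  rw [← List.foldl_map (f := fun r_idx =>
        ((pvBuildRuns (w0 :: rest) 0).getD (r_idx - 1) ("", 0, 0),
         (pvBuildRuns (w0 :: rest) 0).getD r_idx ("", 0, 0),
         (pvBuildRuns (w0 :: rest) 0).getD (r_idx + 1) ("", 0, 0)))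
      (g := pvStepA max_run_length)]
  rw [show (1 : Nat) = 0 + 1 from rfl]
  rw [triples_map_range (pvBuildRuns (w0 :: rest) 0) (pvBuildRuns (w0 :: rest) 0) 0 rfl]
  conv_lhs => rw [hruns, hcg, hwords]
  simp only [runsFrom, Nat.zero_add]
  rw [fold_triples max_run_length gs (pvSpk w0) 0 g0.length g0]

-- ===== per-index machinery =====

-- start[i] of B, as a recursive function of the speaker list
def runStart (spks : List String) : Nat → Nat
  | 0 => 0
  | i + 1 => if spks.getD (i + 1) "" = spks.getD i "" then runStart spks i else i + 1

-- end[i] of B, as a recursive function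
def runEnd (spks : List String) (n : Nat) (i : Nat) : Nat :=
  if h : i + 1 < n ∧ spks.getD i "" = spks.getD (i + 1) "" then runEnd spks n (i + 1) else i + 1
termination_by n - i
decreasing_by omega

-- what B does to the word at index i
def pvTarget (spks : List String) (n : Nat) (m : Int) (i : Nat) (w : List (String × String)) :
    List (String × String) :=
  if 0 < runStart spks i ∧ runEnd spks n i < n ∧
      ((runEnd spks n i : Int) - (runStart spks i : Int) ≤ m) ∧
      spks.getD (runStart spks i - 1) "" = spks.getD (runEnd spks n i) "" ∧
      spks.getD (runStart spks i - 1) "" ≠ spks.getD i "" then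
    pvIns w (spks.getD (runStart spks i - 1) "")
  else w

theorem length_foldl_set {α : Type} (f : List α → Nat → α) (l : List Nat) (st : List α) :
    (l.foldl (fun st i => st.set i (f st i)) st).length = st.length := by
  induction l generalizing st with
  | nil => rfl
  | cons a l ih => simp [List.foldl_cons, ih]

theorem startArr_spec (spks : List String) (n : Nat) :
    ∀ (k : Nat), k + 1 ≤ n → ∀ i, i < n →
      (((List.range' 1 k).foldl
        (fun st i => st.set i (if spks.getD i "" = spks.getD (i - 1) "" then st.getD (i - 1) 0 else i))
        (List.replicate n 0)).getD i 0) = if i ≤ k then runStart spks i else 0 := by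
  intro k
  induction k with
  | zero =>
    intro _ i hi
    simp only [List.range'_zero, List.foldl_nil]
    rcases i with _ | i
    · simp [runStart, List.getD, List.getElem?_replicate, hi]
    · simp [List.getD, List.getElem?_replicate, hi]
  | succ k ih =>
    intro hk i hi
    rw [List.range'_concat, List.foldl_append, List.foldl_cons, List.foldl_nil]
    set st := (List.range' 1 k).foldl
        (fun st i => st.set i (if spks.getD i "" = spks.getD (i - 1) "" then st.getD (i - 1) 0 else i))
        (List.replicate n 0) with hst
    have hlen : st.length = n := by
      rw [hst, length_foldl_set]; simp
    have hk1 : 1 + 1 * k = k + 1 := by omega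
    rw [hk1]
    by_cases hik : i = k + 1
    · subst hik
      have hlt : k + 1 < st.length := by omega
      rw [List.getD, List.getElem?_set_self hlt]
      have hsk : st.getD (k + 1 - 1) 0 = runStart spks k := by
        have := ih (by omega) k (by omega)
        simpa using this
      simp only [Option.getD_some, if_pos (le_refl (k+1))]
      rw [runStart, hsk]
      simp only [Nat.add_sub_cancel]
    · rw [List.getD, List.getElem?_set_ne (by omega)]
      have := ih (by omega) i hi
      rw [List.getD] at this
      rw [this]
      by_cases h1 : i ≤ k
      · rw [if_pos h1, if_pos (by omega)]
      · rw [if_neg h1, if_neg (by omega)]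

theorem endFold_spec (spks : List String) (n : Nat) :
    ∀ (k : Nat) (st : List Nat), st.length = n → k + 1 ≤ n →
      (∀ i, k ≤ i → i < n → st.getD i 0 = runEnd spks n i) →
      ∀ i, i < n →
        (((List.range k).reverse.foldl
          (fun st i => st.set i (if spks.getD i "" = spks.getD (i + 1) "" then st.getD (i + 1) 0 else i + 1))
          st).getD i 0) = runEnd spks n i := by
  intro k
  induction k with
  | zero =>
    intro st _ _ hinv i hi
    simpa using hinv i (Nat.zero_le i) hi
  | succ k ih =>
    intro st hlen hk hinv i hi
    rw [List.range_succ, List.reverse_append, List.reverse_singleton, List.singleton_append,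
      List.foldl_cons]
    apply ih
    · simp [hlen]
    · omega
    · intro j hj hjn
      by_cases hjk : j = k
      · subst hjk
        rw [List.getD, List.getElem?_set_self (by omega)]
        have hnext : st.getD (j + 1) 0 = runEnd spks n (j + 1) := hinv (j + 1) (by omega) (by omega)
        by_cases he : spks.getD j "" = spks.getD (j + 1) ""
        · rw [if_pos he, hnext, Option.getD_some]
          conv_rhs => rw [runEnd]
          rw [dif_pos ⟨by omega, he⟩]
        · rw [if_neg he, Option.getD_some]
          conv_rhs => rw [runEnd]
          rw [dif_neg (by intro hc; exact he hc.2)]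
      · rw [List.getD, List.getElem?_set_ne (by omega)]
        exact hinv j (by omega) hjn
    · exact hi

theorem fold_set_getElem? {α : Type} (C : Nat → Prop) [DecidablePred C] (g : Nat → α → α)
    (d : α) :
    ∀ (k a : Nat) (ws : List α) (j : Nat),
      ((List.range' a k).foldl (fun ws i => if C i then ws.set i (g i (ws.getD i d)) else ws) ws)[j]? =
        if a ≤ j ∧ j < a + k ∧ C j then (ws[j]?).map (g j) else ws[j]? := by
  intro k
  induction k with
  | zero =>
    intro a ws j
    simp only [List.range'_zero, List.foldl_nil]
    rw [if_neg (by omega)]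
  | succ k ih =>
    intro a ws j
    rw [List.range'_succ, List.foldl_cons]
    rw [ih]
    by_cases hja : j = a
    · subst hja
      rw [if_neg (by omega)]
      by_cases hC : C j
      · rw [if_pos hC]
        rw [if_pos (show j ≤ j ∧ j < j + (k + 1) ∧ C j from ⟨le_refl j, by omega, hC⟩)]
        by_cases hlt : j < ws.length
        · rw [List.getElem?_set_self (by simpa using hlt)]
          rw [List.getD, List.getElem?_eq_getElem hlt]
          simp
        · rw [List.getElem?_eq_none (by rw [List.length_set]; omega),
            List.getElem?_eq_none (by omega)]
          simp
      · rw [if_neg hC]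
        rw [if_neg (show ¬(j ≤ j ∧ j < j + (k + 1) ∧ C j) from fun hc => hC hc.2.2)]
    · have hset : ∀ ws' : List α,
          (if C a then ws'.set a (g a (ws'.getD a d)) else ws')[j]? = ws'[j]? := by
        intro ws'
        by_cases hC : C a
        · rw [if_pos hC, List.getElem?_set_ne (by omega)]
        · rw [if_neg hC]
      rw [hset]
      by_cases h1 : a + 1 ≤ j ∧ j < a + 1 + k ∧ C j
      · rw [if_pos h1,
          if_pos (show a ≤ j ∧ j < a + (k + 1) ∧ C j from ⟨by omega, by omega, h1.2.2⟩)]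
      · rw [if_neg h1,
          if_neg (show ¬(a ≤ j ∧ j < a + (k + 1) ∧ C j) from
            fun hc => h1 ⟨by omega, by omega, hc.2.2⟩)]

-- B computed per index
theorem B_getElem (words : List (List (String × String))) (m : Int)
    (h3 : ¬ ((words.length : Int) < 3)) (j : Nat) :
    (smooth_micro_turns_alt words m)[j]? =
      (words[j]?).map (pvTarget (words.map pvSpk) words.length m j) := by
  have hB : smooth_micro_turns_alt words m =
      (List.range words.length).foldl
        (fun ws i =>
          if 0 < ((List.range' 1 (words.length - 1)).foldl
              (fun st i => st.set i (if (words.map pvSpk).getD i "" = (words.map pvSpk).getD (i - 1) "" then st.getD (i - 1) 0 else i))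
              (List.replicate words.length 0)).getD i 0 ∧
            (((List.range (words.length - 1)).reverse).foldl
              (fun st i => st.set i (if (words.map pvSpk).getD i "" = (words.map pvSpk).getD (i + 1) "" then st.getD (i + 1) 0 else i + 1))
              ((List.replicate words.length 0).set (words.length - 1) words.length)).getD i 0 < words.length ∧
            ((((((List.range (words.length - 1)).reverse).foldl
              (fun st i => st.set i (if (words.map pvSpk).getD i "" = (words.map pvSpk).getD (i + 1) "" then st.getD (i + 1) 0 else i + 1))
              ((List.replicate words.length 0).set (words.length - 1) words.length) : List Nat)).getD i 0 : Int) -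
              ((((List.range' 1 (words.length - 1)).foldl
              (fun st i => st.set i (if (words.map pvSpk).getD i "" = (words.map pvSpk).getD (i - 1) "" then st.getD (i - 1) 0 else i))
              (List.replicate words.length 0) : List Nat)).getD i 0 : Int) ≤ m) ∧
            (words.map pvSpk).getD (((List.range' 1 (words.length - 1)).foldl
              (fun st i => st.set i (if (words.map pvSpk).getD i "" = (words.map pvSpk).getD (i - 1) "" then st.getD (i - 1) 0 else i))
              (List.replicate words.length 0)).getD i 0 - 1) "" =
              (words.map pvSpk).getD ((((List.range (words.length - 1)).reverse).foldl
              (fun st i => st.set i (if (words.map pvSpk).getD i "" = (words.map pvSpk).getD (i + 1) "" then st.getD (i + 1) 0 else i + 1))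
              ((List.replicate words.length 0).set (words.length - 1) words.length)).getD i 0) "" ∧
            (words.map pvSpk).getD (((List.range' 1 (words.length - 1)).foldl
              (fun st i => st.set i (if (words.map pvSpk).getD i "" = (words.map pvSpk).getD (i - 1) "" then st.getD (i - 1) 0 else i))
              (List.replicate words.length 0)).getD i 0 - 1) "" ≠ (words.map pvSpk).getD i "" then
            ws.set i (pvIns (ws.getD i []) ((words.map pvSpk).getD (((List.range' 1 (words.length - 1)).foldl
              (fun st i => st.set i (if (words.map pvSpk).getD i "" = (words.map pvSpk).getD (i - 1) "" then st.getD (i - 1) 0 else i))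
              (List.replicate words.length 0)).getD i 0 - 1) ""))
          else ws)
        words := by
    unfold smooth_micro_turns_alt
    rw [if_neg h3]
  rw [hB]
  set n := words.length with hn
  set spks := words.map pvSpk with hspks
  set start := (List.range' 1 (n - 1)).foldl
      (fun st i => st.set i (if spks.getD i "" = spks.getD (i - 1) "" then st.getD (i - 1) 0 else i))
      (List.replicate n 0) with hstart
  set end_ := ((List.range (n - 1)).reverse).foldl
      (fun st i => st.set i (if spks.getD i "" = spks.getD (i + 1) "" then st.getD (i + 1) 0 else i + 1))
      ((List.replicate n 0).set (n - 1) n) with hend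
  have hn3 : 3 ≤ n := by omega
  have hstartv : ∀ i, i < n → start.getD i 0 = runStart spks i := by
    intro i hi
    rw [hstart]
    rw [startArr_spec spks n (n - 1) (by omega) i hi]
    rw [if_pos (by omega)]
  have hendv : ∀ i, i < n → end_.getD i 0 = runEnd spks n i := by
    intro i hi
    rw [hend]
    apply endFold_spec spks n (n - 1) _ _ (by omega) _ i hi
    · simp
    · intro i2 hi2 hi2n
      have hi2e : i2 = n - 1 := by omega
      subst hi2e
      rw [List.getD, List.getElem?_set_self (by simp; omega), Option.getD_some]
      rw [runEnd, dif_neg (by omega)]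
      omega
  rw [List.range_eq_range']
  rw [fold_set_getElem?
    (C := fun i => 0 < start.getD i 0 ∧ end_.getD i 0 < n ∧
      ((end_.getD i 0 : Int) - (start.getD i 0 : Int) ≤ m) ∧
      spks.getD (start.getD i 0 - 1) "" = spks.getD (end_.getD i 0) "" ∧
      spks.getD (start.getD i 0 - 1) "" ≠ spks.getD i "")
    (g := fun i w => pvIns w (spks.getD (start.getD i 0 - 1) "")) (d := []) n 0 words j]
  by_cases hj : j < n
  · rw [hstartv j hj, hendv j hj]
    unfold pvTarget
    by_cases hC : 0 < runStart spks j ∧ runEnd spks n j < n ∧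
        ((runEnd spks n j : Int) - (runStart spks j : Int) ≤ m) ∧
        spks.getD (runStart spks j - 1) "" = spks.getD (runEnd spks n j) "" ∧
        spks.getD (runStart spks j - 1) "" ≠ spks.getD j ""
    · rw [if_pos ⟨by omega, by omega, hC⟩]
      rw [List.getElem?_eq_getElem hj]
      simp only [Option.map_some]
      rw [if_pos hC]
    · rw [if_neg (by intro hc; exact hC hc.2.2)]
      rw [List.getElem?_eq_getElem hj]
      simp only [Option.map_some]
      rw [if_neg hC]
  · rw [if_neg (by omega)]
    rw [List.getElem?_eq_none (by omega)]
    simp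

theorem runStart_block (spks : List String) (off len : Nat) (s : String)
    (hu : ∀ t, t < len → spks.getD (off + t) "" = s)
    (hb : off = 0 ∨ spks.getD (off - 1) "" ≠ s) :
    ∀ t, t < len → runStart spks (off + t) = off := by
  intro t
  induction t with
  | zero =>
    intro h0
    rcases off with _ | o
    · simp [runStart]
    · simp only [Nat.add_zero]
      rw [runStart]
      have h1 : spks.getD (o + 1) "" = s := by simpa using hu 0 h0
      have h2 : spks.getD o "" ≠ s := by
        rcases hb with hb | hb
        · omega
        · simpa using hb
      rw [if_neg (by rw [h1]; exact fun hc => h2 hc.symm)]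
  | succ t iht =>
    intro hlt
    have he : off + (t + 1) = (off + t) + 1 := by omega
    rw [he, runStart]
    have h1 : spks.getD (off + t + 1) "" = s := by
      have := hu (t + 1) hlt
      rwa [← he]
    have h2 : spks.getD (off + t) "" = s := hu t (by omega)
    rw [if_pos (by rw [h1, h2])]
    exact iht (by omega)

theorem runEnd_block (spks : List String) (n : Nat) (off len : Nat) (s : String)
    (hle : off + len ≤ n)
    (hu : ∀ t, t < len → spks.getD (off + t) "" = s)
    (hb : off + len = n ∨ spks.getD (off + len) "" ≠ s)
    (t : Nat) (ht : t < len) : runEnd spks n (off + t) = off + len := by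
  rw [runEnd]
  by_cases hlast : t + 1 = len
  · rcases hb with hb | hb
    · rw [dif_neg (by omega)]
      omega
    · rw [dif_neg (by
        rintro ⟨h1, h2⟩
        rw [hu t ht] at h2
        rw [show off + t + 1 = off + len by omega] at h2
        exact hb h2.symm)]
      omega
  · have hcnd : off + t + 1 < n ∧ spks.getD (off + t) "" = spks.getD (off + t + 1) "" := by
      constructor
      · omega
      · rw [hu t ht]
        have := hu (t + 1) (by omega)
        rw [show off + (t + 1) = off + t + 1 by omega] at this
        rw [this]
    rw [dif_pos hcnd]
    have := runEnd_block spks n off len s hle hu hb (t + 1) (by omega)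
    rw [show off + (t + 1) = off + t + 1 by omega] at this
    exact this
termination_by len - t
decreasing_by omega

theorem getD_map_spk (W : List (List (String × String))) (i : Nat) (x : List (String × String))
    (h : W[i]? = some x) : (W.map pvSpk).getD i "" = pvSpk x := by
  simp [List.getD, List.getElem?_map, h]

theorem head_dropWhile_false {α : Type} (p : α → Bool) :
    ∀ (l : List α) (w : α), (l.dropWhile p).head? = some w → p w = false := by
  intro l
  induction l with
  | nil => intro w h; simp at h
  | cons a l ih =>
    intro w h
    rw [List.dropWhile_cons] at h
    by_cases hp : p a
    · rw [if_pos hp] at h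
      exact ih w h
    · rw [if_neg hp] at h
      simp only [List.head?_cons, Option.some.injEq] at h
      rw [← h]
      simpa using hp

theorem guni (w : List (String × String)) (ws : List (List (String × String))) :
    ∀ (t : Nat) (x : List (String × String)),
      (w :: ws.takeWhile (fun x => pvSpk x == pvSpk w))[t]? = some x → pvSpk x = pvSpk w := by
  intro t x h
  rcases t with _ | t
  · simp only [List.getElem?_cons_zero, Option.some.injEq] at h
    rw [← h]
  · simp only [List.getElem?_cons_succ] at h
    have hmem : x ∈ ws.takeWhile (fun x => pvSpk x == pvSpk w) := List.mem_of_getElem? h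
    have := List.mem_takeWhile_imp hmem
    simpa using this

-- speakers inside a block, read off the global speaker list
theorem block_spk (W : List (List (String × String))) (P g dr : List (List (String × String)))
    (s : String) (hW : W = P ++ (g ++ dr))
    (huni : ∀ (t : Nat) (x : List (String × String)), g[t]? = some x → pvSpk x = s) :
    ∀ t, t < g.length → (W.map pvSpk).getD (P.length + t) "" = s := by
  intro t ht
  have hget : W[P.length + t]? = g[t]? := by
    rw [hW, List.getElem?_append_right (by omega)]
    rw [show P.length + t - P.length = t by omega]
    rw [List.getElem?_append_left ht]
  have hx : g[t]? = some g[t] := List.getElem?_eq_getElem ht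
  rw [hx] at hget
  rw [getD_map_spk W _ _ hget]
  exact huni t g[t] hx

-- the triple-rule fix agrees per index with B's per-word target
theorem pvFixB_single (m : Int) (p bs : String) (bg : List (List (String × String))) :
    pvFixB m p [(bs, bg)] = bg := rfl

theorem pvFixB_pair (m : Int) (p bs : String) (bg : List (List (String × String)))
    (cs : String) (cg : List (List (String × String)))
    (rest : List (String × List (List (String × String)))) :
    pvFixB m p ((bs, bg) :: (cs, cg) :: rest) =
      (if ((bg.length : Int) ≤ m ∧ p = cs ∧ p ≠ bs) then bg.map (fun d => pvIns d p) else bg) ++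
        pvFixB m bs ((cs, cg) :: rest) := rfl

theorem fix_idx (m : Int) (W : List (List (String × String))) :
    ∀ (l P : List (List (String × String))) (p : String) (j : Nat),
      W = P ++ l → 0 < P.length →
      (W.map pvSpk).getD (P.length - 1) "" = p →
      (∀ w, l.head? = some w → pvSpk w ≠ p) →
      (pvFixB m p (cgroups l))[j]? =
        (l[j]?).map (fun x => pvTarget (W.map pvSpk) W.length m (P.length + j) x) := by
  intro l
  induction l using cgroups.induct with
  | case1 =>
    intro P p j hW hP hlast hhead
    simp [cgroups, pvFixB]
  | case2 w ws ih =>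
    intro P p j hW hP hlast hhead
    have hcg : cgroups (w :: ws) =
        (pvSpk w, w :: ws.takeWhile (fun x => pvSpk x == pvSpk w)) ::
          cgroups (ws.dropWhile (fun x => pvSpk x == pvSpk w)) := by rw [cgroups]
    have htkdr : (w :: ws.takeWhile (fun x => pvSpk x == pvSpk w)) ++
        ws.dropWhile (fun x => pvSpk x == pvSpk w) = w :: ws := by
      rw [List.cons_append, List.takeWhile_append_dropWhile]
    have hW2 : W = P ++ ((w :: ws.takeWhile (fun x => pvSpk x == pvSpk w)) ++
        ws.dropWhile (fun x => pvSpk x == pvSpk w)) := by rw [htkdr]; exact hW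
    have hblock := block_spk W P _ _ (pvSpk w) hW2 (guni w ws)
    have hsp : pvSpk w ≠ p := hhead w rfl
    have hlen : W.length = P.length + (w :: ws.takeWhile (fun x => pvSpk x == pvSpk w)).length +
        (ws.dropWhile (fun x => pvSpk x == pvSpk w)).length := by
      rw [hW2]; simp only [List.length_append, List.length_cons]; omega
    have hrs : ∀ t, t < (w :: ws.takeWhile (fun x => pvSpk x == pvSpk w)).length →
        runStart (W.map pvSpk) (P.length + t) = P.length :=
      runStart_block (W.map pvSpk) P.length _ (pvSpk w) hblock
        (Or.inr (by rw [hlast]; exact fun hc => hsp hc.symm))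
    rw [hcg]
    cases hdr : ws.dropWhile (fun x => pvSpk x == pvSpk w) with
    | nil =>
      rw [hdr] at hcg htkdr hW2 hlen
      rw [show cgroups ([] : List (List (String × String))) = [] from by rw [cgroups],
        pvFixB_single]
      have hre : ∀ t, t < (w :: ws.takeWhile (fun x => pvSpk x == pvSpk w)).length →
          runEnd (W.map pvSpk) W.length (P.length + t) =
            P.length + (w :: ws.takeWhile (fun x => pvSpk x == pvSpk w)).length :=
        runEnd_block (W.map pvSpk) W.length P.length _ (pvSpk w) (by simp at hlen ⊢; omega)
          hblock (Or.inl (by simp at hlen ⊢; omega))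
      have hgl : (w :: ws.takeWhile (fun x => pvSpk x == pvSpk w)) = w :: ws := by
        simpa using htkdr
      rw [← hgl]
      by_cases hj : j < (w :: ws.takeWhile (fun x => pvSpk x == pvSpk w)).length
      · rw [List.getElem?_eq_getElem hj]
        simp only [Option.map_some]
        congr 1
        unfold pvTarget
        rw [if_neg (by
          intro hc
          have h2 := hc.2.1
          rw [hre j hj] at h2
          simp only [List.length_cons, List.length_nil] at h2 hlen
          omega)]
      · rw [List.getElem?_eq_none (by omega)]
        simp
    | cons w2 ws2 =>
      rw [hdr] at hcg htkdr hW2 hlen ih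
      have hcg2 : cgroups (w2 :: ws2) =
          (pvSpk w2, w2 :: ws2.takeWhile (fun x => pvSpk x == pvSpk w2)) ::
            cgroups (ws2.dropWhile (fun x => pvSpk x == pvSpk w2)) := by rw [cgroups]
      have hs2 : pvSpk w2 ≠ pvSpk w := by
        have := head_dropWhile_false (fun x => pvSpk x == pvSpk w) ws w2 (by rw [hdr]; rfl)
        simpa using this
      have hget2 : W[P.length + (w :: ws.takeWhile (fun x => pvSpk x == pvSpk w)).length]? =
          some w2 := by
        rw [hW2, List.getElem?_append_right (by omega),
          show P.length + (w :: ws.takeWhile (fun x => pvSpk x == pvSpk w)).length - P.length =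
            (w :: ws.takeWhile (fun x => pvSpk x == pvSpk w)).length from by omega,
          List.getElem?_append_right (le_refl _), Nat.sub_self]
        simp
      have hnext : (W.map pvSpk).getD
          (P.length + (w :: ws.takeWhile (fun x => pvSpk x == pvSpk w)).length) "" = pvSpk w2 :=
        getD_map_spk W _ _ hget2
      have hre : ∀ t, t < (w :: ws.takeWhile (fun x => pvSpk x == pvSpk w)).length →
          runEnd (W.map pvSpk) W.length (P.length + t) =
            P.length + (w :: ws.takeWhile (fun x => pvSpk x == pvSpk w)).length :=
        runEnd_block (W.map pvSpk) W.length P.length _ (pvSpk w) (by omega) hblock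
          (Or.inr (by rw [hnext]; simpa using hs2))
      rw [hcg2, pvFixB_pair, ← hcg2]
      by_cases hj : j < (w :: ws.takeWhile (fun x => pvSpk x == pvSpk w)).length
      · rw [← htkdr, List.getElem?_append_left hj, List.getElem?_eq_getElem hj]
        simp only [Option.map_some]
        by_cases hQ : (((w :: ws.takeWhile (fun x => pvSpk x == pvSpk w)).length : Int) ≤ m ∧
            p = pvSpk w2 ∧ p ≠ pvSpk w)
        · rw [if_pos hQ, List.getElem?_append_left (by simpa using hj), List.getElem?_map,
            List.getElem?_eq_getElem hj]
          simp only [Option.map_some]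
          congr 1
          unfold pvTarget
          rw [hrs j hj, hre j hj, hlast, hnext, hblock j hj]
          rw [if_pos ⟨hP, by simp only [List.length_cons] at hlen ⊢; omega,
            by push_cast; omega, hQ.2.1, hQ.2.2⟩]
        · rw [if_neg hQ, List.getElem?_append_left hj, List.getElem?_eq_getElem hj]
          congr 1
          unfold pvTarget
          rw [hrs j hj, hre j hj, hlast, hnext, hblock j hj]
          rw [if_neg (by
            intro hc
            refine hQ ⟨?_, hc.2.2.2.1, hc.2.2.2.2⟩
            have := hc.2.2.1
            push_cast at this
            omega)]
      · have hchlen : ((if (((w :: ws.takeWhile (fun x => pvSpk x == pvSpk w)).length : Int) ≤ m ∧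
            p = pvSpk w2 ∧ p ≠ pvSpk w) then
              (w :: ws.takeWhile (fun x => pvSpk x == pvSpk w)).map (fun d => pvIns d p)
            else (w :: ws.takeWhile (fun x => pvSpk x == pvSpk w)))).length =
            (w :: ws.takeWhile (fun x => pvSpk x == pvSpk w)).length := by
          split <;> simp
        rw [List.getElem?_append_right (by rw [hchlen]; omega), hchlen]
        rw [← htkdr, List.getElem?_append_right (by omega)]
        have hih := ih (P ++ (w :: ws.takeWhile (fun x => pvSpk x == pvSpk w))) (pvSpk w)
          (j - (w :: ws.takeWhile (fun x => pvSpk x == pvSpk w)).length)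
          (by rw [hW2, List.append_assoc]) (by simp)
          (by
            rw [List.length_append,
              show P.length + (w :: ws.takeWhile (fun x => pvSpk x == pvSpk w)).length - 1 =
                P.length + ((w :: ws.takeWhile (fun x => pvSpk x == pvSpk w)).length - 1) from
                by simp only [List.length_cons]; omega]
            exact hblock _ (by simp only [List.length_cons]; omega))
          (by
            intro x hx
            simp only [List.head?_cons, Option.some.injEq] at hx
            rw [← hx]
            exact hs2)
        rw [hih, List.length_append,
          show P.length + (w :: ws.takeWhile (fun x => pvSpk x == pvSpk w)).length +
              (j - (w :: ws.takeWhile (fun x => pvSpk x == pvSpk w)).length) = P.length + j from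
            by omega]

theorem main_eq (words : List (List (String × String))) (m : Int) :
    smooth_micro_turns words m = smooth_micro_turns_alt words m := by
  by_cases h3 : ((words.length : Int) < 3)
  · unfold smooth_micro_turns smooth_micro_turns_alt
    rw [if_pos h3, if_pos h3]
  · cases words with
    | nil => simp at h3
    | cons w rest =>
      apply List.ext_getElem?
      intro j
      rw [B_getElem _ m h3 j, A_eq_fix w rest m h3]
      have htkdr : (w :: rest.takeWhile (fun x => pvSpk x == pvSpk w)) ++
          rest.dropWhile (fun x => pvSpk x == pvSpk w) = w :: rest := by
        rw [List.cons_append, List.takeWhile_append_dropWhile]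
      have hW2 : w :: rest = ([] : List (List (String × String))) ++
          ((w :: rest.takeWhile (fun x => pvSpk x == pvSpk w)) ++
            rest.dropWhile (fun x => pvSpk x == pvSpk w)) := by
        rw [htkdr]; rfl
      have hblock := block_spk (w :: rest) [] _ _ (pvSpk w) hW2 (guni w rest)
      have hrs0 : ∀ t, t < (w :: rest.takeWhile (fun x => pvSpk x == pvSpk w)).length →
          runStart ((w :: rest).map pvSpk) t = 0 := by
        intro t ht
        have := runStart_block ((w :: rest).map pvSpk) 0 _ (pvSpk w)
          (by simpa using hblock) (Or.inl rfl) t ht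
        simpa using this
      by_cases hj : j < (w :: rest.takeWhile (fun x => pvSpk x == pvSpk w)).length
      · have hidx : (w :: rest)[j]? =
            (w :: rest.takeWhile (fun x => pvSpk x == pvSpk w))[j]? := by
          rw [← htkdr, List.getElem?_append_left hj]
        rw [List.getElem?_append_left hj, hidx, List.getElem?_eq_getElem hj]
        simp only [Option.map_some]
        congr 1
        unfold pvTarget
        rw [if_neg (by
          intro hc
          have h1 := hc.1
          rw [hrs0 j hj] at h1
          omega)]
      · have hidx : (w :: rest)[j]? =
            (rest.dropWhile (fun x => pvSpk x == pvSpk w))[j -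
              (w :: rest.takeWhile (fun x => pvSpk x == pvSpk w)).length]? := by
          rw [← htkdr, List.getElem?_append_right (by omega)]
        rw [List.getElem?_append_right (by omega), hidx]
        have hfix := fix_idx m (w :: rest) (rest.dropWhile (fun x => pvSpk x == pvSpk w))
          (w :: rest.takeWhile (fun x => pvSpk x == pvSpk w)) (pvSpk w)
          (j - (w :: rest.takeWhile (fun x => pvSpk x == pvSpk w)).length)
          (by rw [htkdr]) (by simp)
          (by
            have := hblock ((w :: rest.takeWhile (fun x => pvSpk x == pvSpk w)).length - 1)
              (by simp only [List.length_cons]; omega)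
            simpa using this)
          (by
            intro x hx
            have := head_dropWhile_false (fun x => pvSpk x == pvSpk w) rest x hx
            simpa using this)
        rw [hfix,
          show (w :: rest.takeWhile (fun x => pvSpk x == pvSpk w)).length +
              (j - (w :: rest.takeWhile (fun x => pvSpk x == pvSpk w)).length) = j from by omega]

-- ===== VERDICT (by name: the statement is the Claim_ definition above) =====
theorem smooth_micro_turns_spec : Claim_equal_smooth_micro_turns := by
  intro words max_run_length _
  exact main_eq words max_run_length
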